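-- pv_equiv track=rewrite | github.com/w-kibor/Data-Structures-and-Algorithms | Logic Building Problems/Medium Problems/recurring_sequence_in_a_fraction.py | recurring_sequence
-- ===== SOURCE A (Python) =====
-- def recurring_sequence(numerator: int, denominator: int) -> str:
--     """Return the repeating sequence of digits in numerator/denominator.
--
--     If the decimal terminates, return an empty string.
--     """
--     if denominator == 0:
--         raise ValueError("Denominator must be non-zero")
--     numerator = abs(numerator)
--     denominator = abs(denominator)
--     remainder = numerator % denominator
--
--     seen = {}
--     digits = []
--     idx = 0
--     while remainder != 0 and remainder not in seen:
--         seen[remainder] = idx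
--         remainder *= 10
--         digit = remainder // denominator
--         digits.append(str(digit))
--         remainder %= denominator
--         idx += 1
--
--     if remainder == 0:
--         return ""
--     start = seen[remainder]
--     return "".join(digits[start:])
-- ===== SOURCE B (Python) =====
-- def recurring_sequence(numerator: int, denominator: int) -> str:
--     """Return the repeating sequence of digits in numerator/denominator.
--
--     Closed-form cycle location: reduce the fraction, strip factors of 2 and 5
--     to find where the cycle starts, then emit exactly one period.
--     """
--     if denominator == 0:
--         raise ValueError("Denominator must be non-zero")
--     d = abs(denominator)
--     r = abs(numerator) % d
--     if r == 0:
--         return ""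
--     # v = reduced denominator (Euclid's algorithm for the gcd)
--     x, y = r, d
--     while y:
--         x, y = y, x % y
--     v = d // x
--     # strip factors of 2 and 5: the cycle starts after max(a, b) digits
--     a = 0
--     while v % 2 == 0:
--         v //= 2
--         a += 1
--     b = 0
--     while v % 5 == 0:
--         v //= 5
--         b += 1
--     if v == 1:
--         return ""
--     for _ in range(max(a, b)):
--         r = r * 10 % d
--     # emit one full period, starting at the cycle-start remainder
--     out = []
--     s = r
--     while True:
--         s *= 10
--         out.append(str(s // d))
--         s %= d
--         if s == r:
--             break
--     return "".join(out)
-- ===== Notes on version B (the rewrite author's own statement) =====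
-- stated objective: alternative
-- what changed: Replaces A's long-division simulation with a seen-remainder dict and slice by a closed-form cycle location: reduce the fraction with gcd, strip factors of 2 and 5 from the reduced denominator to find where the cycle starts, then emit exactly one period of digits (no dict, no slicing).
import Mathlib
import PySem

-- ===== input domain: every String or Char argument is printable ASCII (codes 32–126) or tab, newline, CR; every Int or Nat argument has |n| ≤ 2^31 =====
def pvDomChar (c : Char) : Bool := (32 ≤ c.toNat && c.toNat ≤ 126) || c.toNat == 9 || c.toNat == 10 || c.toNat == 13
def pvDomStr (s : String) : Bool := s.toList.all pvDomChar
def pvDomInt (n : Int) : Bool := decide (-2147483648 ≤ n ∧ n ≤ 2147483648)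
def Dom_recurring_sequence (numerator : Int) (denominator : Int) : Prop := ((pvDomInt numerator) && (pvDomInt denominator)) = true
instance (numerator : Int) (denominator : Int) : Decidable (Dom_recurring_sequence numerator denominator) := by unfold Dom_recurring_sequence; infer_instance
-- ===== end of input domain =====

-- B locates the repeating block in closed form (reduce the fraction, strip factors of 2 and 5,
-- emit exactly one period) instead of A's long-division simulation with a seen-remainder dict: alternative algorithm.


-- ===== PORT A =====
-- A's while loop (state: remainder, seen dict, digit list, idx).  Python's while has no fuel;
-- fuel |denominator| + 1 provably suffices (lemma loopA_run + the J ≤ d bounds below), so the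
-- fuel-0 branch is unreachable on Pre_.  All values are nonnegative Python ints, so Nat % and /
-- coincide with Python's % and // exactly.
def loopA (den : Nat) : Nat → Nat → PySem.Dict Nat Nat → List String → Nat → Nat × PySem.Dict Nat Nat × List String
  | 0, r, seen, digits, _ => (r, seen, digits)
  | fuel+1, r, seen, digits, idx =>
    if r ≠ 0 ∧ seen.get? r = none then
      loopA den fuel (r * 10 % den) (seen.insert r idx)
        (digits ++ [PySem.Int.toStr ((r * 10 / den : Nat) : Int)]) (idx + 1)
    else (r, seen, digits)

def recurring_sequence (numerator : Int) (denominator : Int) : String :=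
  -- denominator = 0: Python raises ValueError; excluded by Pre_
  let den := denominator.natAbs
  let res := loopA den (den + 1) (numerator.natAbs % den) PySem.Dict.empty [] 0
  if res.1 = 0 then ""
  else
    match res.2.1.get? res.1 with
    | some start => PySem.Str.join "" (PySem.List.slice res.2.2 (some (start : Int)) none)
    | none => ""   -- unreachable: the loop only stops at a remainder already in seen (Python's seen[remainder] never raises)

-- ===== PORT B =====
-- while y: x, y = y, x % y   (Euclid)
def gcdLoop (x y : Nat) : Nat :=
  if h : y = 0 then x else gcdLoop y (x % y)
termination_by y
decreasing_by exact Nat.mod_lt x (Nat.pos_of_ne_zero h)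

-- while v % p == 0: v //= p; c += 1   (v ≥ 1 and p ∈ {2,5} at both call sites make this total)
def stripLoop (p v c : Nat) : Nat × Nat :=
  if h : v % p = 0 ∧ v ≠ 0 ∧ 2 ≤ p then stripLoop p (v / p) (c + 1) else (v, c)
termination_by v
decreasing_by exact Nat.div_lt_self (Nat.pos_of_ne_zero h.2.1) h.2.2

-- for _ in range(k): r = r * 10 % d
def advLoop (den : Nat) : Nat → Nat → Nat
  | 0, r => r
  | k+1, r => advLoop den k (r * 10 % den)

-- while True: s *= 10; out.append(str(s // d)); s %= d; if s == r: break
-- fuel |denominator| + 1 provably suffices (lemma emit_spec + L ≤ d below)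
def emitLoop (den r : Nat) : Nat → Nat → List String → List String
  | 0, _, out => out
  | fuel+1, s, out =>
    let out1 := out ++ [PySem.Int.toStr ((s * 10 / den : Nat) : Int)]
    if s * 10 % den = r then out1 else emitLoop den r fuel (s * 10 % den) out1

def recurring_sequence_alt (numerator : Int) (denominator : Int) : String :=
  let d := denominator.natAbs
  let r := numerator.natAbs % d
  if r = 0 then ""
  else
    let v := d / gcdLoop r d
    let s2 := stripLoop 2 v 0
    let s5 := stripLoop 5 s2.1 0
    if s5.1 = 1 then ""
    else
      let r2 := advLoop d (max s2.2 s5.2) r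
      PySem.Str.join "" (emitLoop d r2 (d + 1) r2 [])

-- ===== PRECONDITION & SPEC =====
-- Pre_ excludes exactly denominator = 0, where Python A raises ValueError.
def Pre_recurring_sequence (numerator : Int) (denominator : Int) : Prop := denominator ≠ 0
instance (numerator : Int) (denominator : Int) : Decidable (Pre_recurring_sequence numerator denominator) := by
  unfold Pre_recurring_sequence; infer_instance

def pvWitness_recurring_sequence : Int × Int := (1, 7)

def Spec_recurring_sequence (numerator : Int) (denominator : Int) (out : String) : Prop := out = recurring_sequence_alt numerator denominator
instance (numerator : Int) (denominator : Int) (out : String) : Decidable (Spec_recurring_sequence numerator denominator out) := by unfold Spec_recurring_sequence; infer_instance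

-- ===== CLAIM (what is proved, stated in full; the proofs are below) =====
def Claim_equal_recurring_sequence : Prop := ∀ (numerator : Int) (denominator : Int), Dom_recurring_sequence numerator denominator → Pre_recurring_sequence numerator denominator → Spec_recurring_sequence numerator denominator (recurring_sequence numerator denominator)

-- ===== LEMMAS AND PROOFS =====

-- the long-division remainder sequence and its digit strings


def rseq (d r0 i : Nat) : Nat := r0 * 10 ^ i % d

theorem rseq_succ (d r0 i : Nat) : rseq d r0 (i+1) = rseq d r0 i * 10 % d := by
  rw [rseq, rseq, pow_succ, ← mul_assoc, Nat.mod_mul_mod]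

theorem ten_pow_eq (i : Nat) : (10:Nat) ^ i = 2 ^ i * 5 ^ i := by rw [← Nat.mul_pow]

theorem two_pow_dvd (a i : Nat) : 2 ^ a ∣ 10 ^ i ↔ a ≤ i := by
  rw [ten_pow_eq]
  constructor
  · intro h
    have hcop : Nat.Coprime (2 ^ a) (5 ^ i) := Nat.Coprime.pow a i (by norm_num)
    exact (Nat.pow_dvd_pow_iff_le_right (by norm_num)).mp (hcop.dvd_of_dvd_mul_right h)
  · intro h
    exact dvd_trans (pow_dvd_pow 2 h) (dvd_mul_right _ _)

theorem five_pow_dvd (b i : Nat) : 5 ^ b ∣ 10 ^ i ↔ b ≤ i := by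
  rw [ten_pow_eq]
  constructor
  · intro h
    have hcop : Nat.Coprime (5 ^ b) (2 ^ i) := Nat.Coprime.pow b i (by norm_num)
    rw [mul_comm] at h
    exact (Nat.pow_dvd_pow_iff_le_right (by norm_num)).mp (hcop.dvd_of_dvd_mul_right h)
  · intro h
    exact dvd_trans (pow_dvd_pow 5 h) (dvd_mul_left _ _)

theorem coprime_m_ten {m : Nat} (h2 : ¬ 2 ∣ m) (h5 : ¬ 5 ∣ m) : Nat.Coprime m 10 := by
  have c2 : Nat.Coprime 2 m := (Nat.Prime.coprime_iff_not_dvd (by norm_num)).mpr h2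
  have c5 : Nat.Coprime 5 m := (Nat.Prime.coprime_iff_not_dvd (by norm_num)).mpr h5
  simpa using (Nat.Coprime.mul_right c2.symm c5.symm)

theorem v_dvd_ten_pow {v a b m : Nat} (i : Nat) (hv : v = 2 ^ a * 5 ^ b * m)
    (h2 : ¬ 2 ∣ m) (h5 : ¬ 5 ∣ m) : (v ∣ 10 ^ i ↔ a ≤ i ∧ b ≤ i ∧ m = 1) := by
  subst hv
  constructor
  · intro h
    have hm : m ∣ 10 ^ i := dvd_trans ⟨2 ^ a * 5 ^ b, by ring⟩ h
    have h2a : (2:Nat) ^ a ∣ 10 ^ i := dvd_trans ⟨5 ^ b * m, by ring⟩ h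
    have h5b : (5:Nat) ^ b ∣ 10 ^ i := dvd_trans ⟨2 ^ a * m, by ring⟩ h
    exact ⟨(two_pow_dvd _ _).mp h2a, (five_pow_dvd _ _).mp h5b,
      Nat.Coprime.eq_one_of_dvd ((coprime_m_ten h2 h5).pow_right i) hm⟩
  · rintro ⟨ha, hb, hm⟩
    subst hm
    have := Nat.Coprime.mul_dvd_of_dvd_of_dvd (Nat.Coprime.pow a b (by norm_num))
      ((two_pow_dvd a i).mpr ha) ((five_pow_dvd b i).mpr hb)
    simpa using this

theorem odd_ten_pow_sub_one {e : Nat} (he : 1 ≤ e) : ¬ 2 ∣ 10 ^ e - 1 ∧ ¬ 5 ∣ 10 ^ e - 1 := by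
  have h1 : 1 ≤ 10 ^ e := Nat.one_le_pow _ _ (by norm_num)
  have h2 : (2:Nat) ∣ 10 ^ e := dvd_pow (by norm_num) (by omega)
  have h5 : (5:Nat) ∣ 10 ^ e := dvd_pow (by norm_num) (by omega)
  omega

theorem key_dvd {v a b m : Nat} (i : Nat) {e : Nat} (hv : v = 2 ^ a * 5 ^ b * m)
    (h2 : ¬ 2 ∣ m) (h5 : ¬ 5 ∣ m) (he : 1 ≤ e) :
    (v ∣ 10 ^ i * (10 ^ e - 1) ↔ a ≤ i ∧ b ≤ i ∧ m ∣ 10 ^ e - 1) := by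
  obtain ⟨ho2, ho5⟩ := odd_ten_pow_sub_one he
  have hco2 : Nat.Coprime (2 ^ a) (10 ^ e - 1) :=
    Nat.Coprime.pow_left a ((Nat.Prime.coprime_iff_not_dvd (by norm_num)).mpr ho2)
  have hco5 : Nat.Coprime (5 ^ b) (10 ^ e - 1) :=
    Nat.Coprime.pow_left b ((Nat.Prime.coprime_iff_not_dvd (by norm_num)).mpr ho5)
  have hcom : Nat.Coprime m (10 ^ i) := (coprime_m_ten h2 h5).pow_right i
  subst hv
  constructor
  · intro h
    have hm : m ∣ 10 ^ i * (10 ^ e - 1) := dvd_trans ⟨2 ^ a * 5 ^ b, by ring⟩ h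
    have h2a : (2:Nat) ^ a ∣ 10 ^ i * (10 ^ e - 1) := dvd_trans ⟨5 ^ b * m, by ring⟩ h
    have h5b : (5:Nat) ^ b ∣ 10 ^ i * (10 ^ e - 1) := dvd_trans ⟨2 ^ a * m, by ring⟩ h
    exact ⟨(two_pow_dvd _ _).mp (hco2.dvd_of_dvd_mul_right h2a),
      (five_pow_dvd _ _).mp (hco5.dvd_of_dvd_mul_right h5b),
      hcom.dvd_of_dvd_mul_left hm⟩
  · rintro ⟨ha, hb, hm⟩
    exact mul_dvd_mul (Nat.Coprime.mul_dvd_of_dvd_of_dvd (Nat.Coprime.pow a b (by norm_num))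
      ((two_pow_dvd a i).mpr ha) ((five_pow_dvd b i).mpr hb)) hm

theorem rseq_reduced {d r0 g u v : Nat} (i : Nat) (hr : r0 = g * u) (hd : d = g * v) :
    rseq d r0 i = g * (u * 10 ^ i % v) := by
  subst hr hd; rw [rseq, mul_assoc, Nat.mul_mod_mul_left]

theorem mod_eq_iff_dvd {u v : Nat} (huv : Nat.Coprime u v) {i j : Nat} (hij : i < j) :
    (u * 10 ^ i % v = u * 10 ^ j % v ↔ v ∣ 10 ^ i * (10 ^ (j - i) - 1)) := by
  have hle : u * 10 ^ i ≤ u * 10 ^ j :=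
    Nat.mul_le_mul_left u (Nat.pow_le_pow_right (by norm_num) (le_of_lt hij))
  have hij' : i + (j - i) = j := by omega
  have hsub : u * (10 ^ i * (10 ^ (j - i) - 1)) = u * 10 ^ j - u * 10 ^ i := by
    rw [Nat.mul_sub, Nat.mul_sub, mul_one, ← pow_add, hij']
  constructor
  · intro h
    have := (Nat.modEq_iff_dvd' hle).mp h
    rw [← hsub] at this
    exact huv.symm.dvd_of_dvd_mul_left this
  · intro h
    exact (Nat.modEq_iff_dvd' hle).mpr (hsub ▸ Dvd.dvd.mul_left h u)

theorem rseq_eq_zero_iff {d r0 g u v a b m : Nat} (i : Nat)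
    (hg : 0 < g) (hr : r0 = g * u) (hdv : d = g * v)
    (huv : Nat.Coprime u v) (hv : v = 2 ^ a * 5 ^ b * m) (h2 : ¬ 2 ∣ m) (h5 : ¬ 5 ∣ m) :
    (rseq d r0 i = 0 ↔ a ≤ i ∧ b ≤ i ∧ m = 1) := by
  rw [rseq_reduced i hr hdv, ← v_dvd_ten_pow i hv h2 h5]
  constructor
  · intro h
    have h0 : u * 10 ^ i % v = 0 := by
      rcases Nat.mul_eq_zero.mp h with h' | h'
      · omega
      · exact h'
    exact huv.symm.dvd_of_dvd_mul_left (Nat.dvd_of_mod_eq_zero h0)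
  · intro h
    have h0 : u * 10 ^ i % v = 0 := Nat.mod_eq_zero_of_dvd (h.mul_left u)
    simp [h0]

theorem rseq_eq_iff {d r0 g u v a b m : Nat} {i j : Nat} (hij : i < j)
    (hg : 0 < g) (hr : r0 = g * u) (hdv : d = g * v)
    (huv : Nat.Coprime u v) (hv : v = 2 ^ a * 5 ^ b * m) (h2 : ¬ 2 ∣ m) (h5 : ¬ 5 ∣ m) :
    (rseq d r0 i = rseq d r0 j ↔ a ≤ i ∧ b ≤ i ∧ m ∣ 10 ^ (j - i) - 1) := by
  rw [rseq_reduced i hr hdv, rseq_reduced j hr hdv]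
  rw [← key_dvd i hv h2 h5 (by omega : 1 ≤ j - i), ← mod_eq_iff_dvd huv hij]
  exact ⟨fun h => Nat.eq_of_mul_eq_mul_left hg h, fun h => by rw [h]⟩

theorem exists_period {m : Nat} (hm : 2 ≤ m) (h2 : ¬ 2 ∣ m) (h5 : ¬ 5 ∣ m) :
    ∃ e, (1 ≤ e ∧ m ∣ 10 ^ e - 1) ∧ e ≤ m := by
  have hmaps : ∀ i ∈ Finset.range (m+1), 10 ^ i % m ∈ Finset.range m :=
    fun i _ => Finset.mem_range.mpr (Nat.mod_lt _ (by omega))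
  obtain ⟨i, hi, j, hj, hne, heq⟩ :=
    Finset.exists_ne_map_eq_of_card_lt_of_maps_to (by simp) hmaps
  rw [Finset.mem_range] at hi hj
  -- orient i < j
  rcases Nat.lt_or_ge i j with hij | hge
  case _ =>
    have h1 : (1 : Nat) * 10 ^ i % m = 1 * 10 ^ j % m := by simpa using heq
    have hdvd := (mod_eq_iff_dvd (Nat.coprime_one_left m) hij).mp h1
    have hmE : m ∣ 10 ^ (j - i) - 1 :=
      ((coprime_m_ten h2 h5).pow_right i).dvd_of_dvd_mul_left hdvd
    exact ⟨j - i, ⟨by omega, hmE⟩, by omega⟩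
  case _ =>
    have hji : j < i := by omega
    have h1 : (1 : Nat) * 10 ^ j % m = 1 * 10 ^ i % m := by simpa using heq.symm
    have hdvd := (mod_eq_iff_dvd (Nat.coprime_one_left m) hji).mp h1
    have hmE : m ∣ 10 ^ (i - j) - 1 :=
      ((coprime_m_ten h2 h5).pow_right j).dvd_of_dvd_mul_left hdvd
    exact ⟨i - j, ⟨by omega, hmE⟩, by omega⟩


def dstr (d r0 i : Nat) : String := PySem.Int.toStr ((rseq d r0 i * 10 / d : Nat) : Int)

def seenD (d r0 t : Nat) : PySem.Dict Nat Nat :=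
  (List.range t).foldl (fun dd i => dd.insert (rseq d r0 i) i) PySem.Dict.empty

def digsL (d r0 t : Nat) : List String := (List.range t).map (dstr d r0)

theorem seenD_succ (d r0 t : Nat) :
    seenD d r0 (t+1) = (seenD d r0 t).insert (rseq d r0 t) t := by
  unfold seenD; rw [List.range_succ, List.foldl_append]; rfl

theorem digsL_succ (d r0 t : Nat) : digsL d r0 (t+1) = digsL d r0 t ++ [dstr d r0 t] := by
  unfold digsL; rw [List.range_succ, List.map_append]; rfl

theorem seen_get?_none (d r0 t x : Nat) (h : ∀ i, i < t → rseq d r0 i ≠ x) :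
    (seenD d r0 t).get? x = none := by
  induction t with
  | zero => rfl
  | succ t ih =>
    rw [seenD_succ, PySem.Dict.get?_insert]
    rw [if_neg (fun hx => h t (by omega) hx.symm)]
    exact ih (fun i hi => h i (by omega))

theorem seen_get?_some (d r0 t k x : Nat) (hk : k < t) (hx : rseq d r0 k = x)
    (huniq : ∀ j, j < t → j ≠ k → rseq d r0 j ≠ x) :
    (seenD d r0 t).get? x = some k := by
  induction t with
  | zero => omega
  | succ t ih =>
    rw [seenD_succ, PySem.Dict.get?_insert]
    by_cases hkt : k = t
    · subst hkt; rw [if_pos hx.symm]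
    · rw [if_neg (fun hxx => huniq t (by omega) (fun ht => hkt ht.symm) hxx.symm)]
      exact ih (by omega) (fun j hj hjk => huniq j (by omega) hjk)

theorem loopA_run (d r0 J : Nat) (hd : 0 < d)
    (hpre : ∀ t, t < J → rseq d r0 t ≠ 0 ∧ ∀ i, i < t → rseq d r0 i ≠ rseq d r0 t)
    (hstop : rseq d r0 J = 0 ∨ ∃ i, i < J ∧ rseq d r0 i = rseq d r0 J) :
    ∀ n t fuel, t + n = J → n < fuel →
      loopA d fuel (rseq d r0 t) (seenD d r0 t) (digsL d r0 t) t
        = (rseq d r0 J, seenD d r0 J, digsL d r0 J) := by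
  intro n
  induction n with
  | zero =>
    intro t fuel ht hfuel
    obtain rfl : t = J := by omega
    obtain ⟨f, rfl⟩ : ∃ f, fuel = f + 1 := ⟨fuel - 1, by omega⟩
    rw [loopA]
    rcases hstop with h0 | ⟨i, hi, heq⟩
    · rw [if_neg (by simp [h0])]
    · have huniq : ∀ j, j < t → j ≠ i → rseq d r0 j ≠ rseq d r0 t := by
        intro j hj hji hcon
        rcases Nat.lt_or_ge j i with hlt | hge
        · exact (hpre i hi).2 j hlt (hcon.trans heq.symm)
        · exact (hpre j hj).2 i (by omega) (heq.trans hcon.symm)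
      have hsome := seen_get?_some d r0 t i (rseq d r0 t) hi heq huniq
      rw [if_neg (by simp [hsome])]
  | succ n ih =>
    intro t fuel ht hfuel
    obtain ⟨f, rfl⟩ : ∃ f, fuel = f + 1 := ⟨fuel - 1, by omega⟩
    have htJ : t < J := by omega
    obtain ⟨hne, hdist⟩ := hpre t htJ
    rw [loopA, if_pos ⟨hne, seen_get?_none d r0 t _ (fun i hi => hdist i hi)⟩,
      ← rseq_succ, ← seenD_succ]
    have hds : digsL d r0 t ++ [PySem.Int.toStr ((rseq d r0 t * 10 / d : Nat) : Int)]
        = digsL d r0 (t+1) := (digsL_succ d r0 t).symm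
    rw [hds]
    exact ih (t+1) f (by omega) (by omega)

theorem gcdLoop_eq (x y : Nat) : gcdLoop x y = Nat.gcd x y := by
  induction y using Nat.strong_induction_on generalizing x with
  | _ y ih =>
    rw [gcdLoop]
    by_cases hy : y = 0
    · subst hy; simp
    · rw [dif_neg hy, ih (x % y) (Nat.mod_lt _ (Nat.pos_of_ne_zero hy)) y,
        Nat.gcd_comm x y, Nat.gcd_rec y x, Nat.gcd_comm (x % y) y]

theorem stripLoop_spec (p : Nat) (hp : 2 ≤ p) : ∀ v, 0 < v → ∀ c,
    ∃ a w, stripLoop p v c = (w, c + a) ∧ v = p ^ a * w ∧ ¬ p ∣ w ∧ 0 < w := by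
  intro v
  induction v using Nat.strong_induction_on with
  | _ v ih =>
    intro hv c
    rw [stripLoop]
    by_cases hdvd : v % p = 0
    · rw [dif_pos ⟨hdvd, by omega, hp⟩]
      have hpd : p ∣ v := Nat.dvd_of_mod_eq_zero hdvd
      have hlt : v / p < v := Nat.div_lt_self hv hp
      have hpos : 0 < v / p := Nat.div_pos (Nat.le_of_dvd hv hpd) (by omega)
      obtain ⟨a, w, heq, hvw, hnd, hw⟩ := ih (v/p) hlt hpos (c+1)
      refine ⟨a+1, w, by rw [heq]; congr 1; omega, ?_, hnd, hw⟩
      calc v = v / p * p := (Nat.div_mul_cancel hpd).symm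
        _ = p ^ a * w * p := by rw [hvw]
        _ = p ^ (a+1) * w := by ring
    · rw [dif_neg (by tauto)]
      exact ⟨0, v, by simp, by simp, fun hdv => hdvd (Nat.mod_eq_zero_of_dvd hdv), hv⟩

theorem advLoop_rseq (d r0 : Nat) : ∀ k t, advLoop d k (rseq d r0 t) = rseq d r0 (t + k) := by
  intro k
  induction k with
  | zero => intro t; rfl
  | succ k ih =>
    intro t
    rw [advLoop, ← rseq_succ, ih (t+1)]
    congr 1
    omega

theorem cons_map_range {α : Type} (f : Nat → α) (n : Nat) :
    f 0 :: (List.range (n+1)).map (fun i => f (i+1)) = (List.range (n+2)).map f := by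
  conv_rhs => rw [show n+2 = 1 + (n+1) by omega, List.range_add, List.map_append, List.map_map]
  have h : (List.range (n+1)).map (fun i => f (i+1)) = (List.range (n+1)).map (f ∘ (1 + ·)) :=
    List.map_congr_left (fun i _ => by simp [Nat.add_comm])
  rw [h]
  rfl

theorem emit_spec (d r0 K L : Nat)
    (hcyc : rseq d r0 (K + L) = rseq d r0 K)
    (hne : ∀ t, 0 < t → t < L → rseq d r0 (K + t) ≠ rseq d r0 K) :
    ∀ n t out fuel, t + n + 1 = L → n < fuel →
      emitLoop d (rseq d r0 K) fuel (rseq d r0 (K + t)) out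
        = out ++ (List.range (n+1)).map (fun i => dstr d r0 (K + t + i)) := by
  intro n
  induction n with
  | zero =>
    intro t out fuel ht hfuel
    obtain ⟨f, rfl⟩ : ∃ f, fuel = f + 1 := ⟨fuel - 1, by omega⟩
    have hstep : rseq d r0 (K + t) * 10 % d = rseq d r0 K := by
      rw [← rseq_succ, show K + t + 1 = K + L by omega, hcyc]
    simp only [emitLoop]
    rw [hstep]
    simp only [if_pos]
    rfl
  | succ n ih =>
    intro t out fuel ht hfuel
    obtain ⟨f, rfl⟩ : ∃ f, fuel = f + 1 := ⟨fuel - 1, by omega⟩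
    have hstep : rseq d r0 (K + t) * 10 % d = rseq d r0 (K + (t + 1)) := by
      rw [← rseq_succ]; exact congrArg (rseq d r0) (by omega)
    have hne' : rseq d r0 (K + (t + 1)) ≠ rseq d r0 K := hne (t+1) (by omega) (by omega)
    simp only [emitLoop]
    rw [hstep, if_neg hne', ih (t+1) _ f (by omega) (by omega), List.append_assoc]
    congr 1
    have hfe : (fun i => dstr d r0 (K + (t + 1) + i)) = (fun i => dstr d r0 (K + t + (i + 1))) :=
      funext fun i => by congr 1; omega
    rw [hfe]
    exact cons_map_range (fun i => dstr d r0 (K + t + i)) n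

theorem seenD_zero (d r0 : Nat) : seenD d r0 0 = PySem.Dict.empty := rfl
theorem digsL_zero (d r0 : Nat) : digsL d r0 0 = [] := rfl

-- Both ports, with every let inlined, agree (d = |denominator|, r0 = |numerator| % d).
theorem main_eq (d r0 : Nat) (hd : 0 < d) (hr0 : r0 < d) :
    (if (loopA d (d+1) r0 PySem.Dict.empty [] 0).1 = 0 then ""
     else
       match (loopA d (d+1) r0 PySem.Dict.empty [] 0).2.1.get? (loopA d (d+1) r0 PySem.Dict.empty [] 0).1 with
       | some start => PySem.Str.join "" (PySem.List.slice (loopA d (d+1) r0 PySem.Dict.empty [] 0).2.2 (some (start : Int)) none)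
       | none => "")
    = (if r0 = 0 then ""
       else if (stripLoop 5 (stripLoop 2 (d / gcdLoop r0 d) 0).1 0).1 = 1 then ""
       else
         PySem.Str.join ""
           (emitLoop d
             (advLoop d (max (stripLoop 2 (d / gcdLoop r0 d) 0).2 (stripLoop 5 (stripLoop 2 (d / gcdLoop r0 d) 0).1 0).2) r0)
             (d+1)
             (advLoop d (max (stripLoop 2 (d / gcdLoop r0 d) 0).2 (stripLoop 5 (stripLoop 2 (d / gcdLoop r0 d) 0).1 0).2) r0)
             [])) := by
  have hrs0 : rseq d r0 0 = r0 := by simp [rseq, Nat.mod_eq_of_lt hr0]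
  by_cases hz : r0 = 0
  · subst hz
    have hloop : loopA d (d+1) 0 PySem.Dict.empty [] 0 = (0, PySem.Dict.empty, []) := by
      rw [loopA, if_neg (by simp)]
    simp [hloop]
  -- r0 > 0 : reduce the fraction and decompose the denominator
  · have hgpos : 0 < Nat.gcd r0 d := Nat.gcd_pos_of_pos_right _ hd
    have hgr : Nat.gcd r0 d ∣ r0 := Nat.gcd_dvd_left r0 d
    have hgd : Nat.gcd r0 d ∣ d := Nat.gcd_dvd_right r0 d
    have hrgu : r0 = Nat.gcd r0 d * (r0 / Nat.gcd r0 d) := (Nat.mul_div_cancel' hgr).symm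
    have hdgv : d = Nat.gcd r0 d * (d / Nat.gcd r0 d) := (Nat.mul_div_cancel' hgd).symm
    have huv : Nat.Coprime (r0 / Nat.gcd r0 d) (d / Nat.gcd r0 d) := Nat.coprime_div_gcd_div_gcd hgpos
    set g := Nat.gcd r0 d with hgdef
    set u := r0 / g with hudef
    set v := d / g with hvdef
    have hvpos : 0 < v := Nat.div_pos (Nat.le_of_dvd hd hgd) hgpos
    have hvled : v ≤ d := Nat.le_of_dvd hd (hdgv ▸ Dvd.intro_left g rfl)
    obtain ⟨a, va, hstrip2, hva, hnd2, hva0⟩ := stripLoop_spec 2 (by norm_num) v hvpos 0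
    obtain ⟨b, m, hstrip5, hvb, hnd5, hmpos⟩ := stripLoop_spec 5 (by norm_num) va hva0 0
    rw [Nat.zero_add] at hstrip2 hstrip5
    have hvm : v = 2^a * 5^b * m := by rw [hva, hvb]; ring
    have hmva : m ∣ va := hvb ▸ Dvd.intro_left _ rfl
    have hnd2m : ¬ 2 ∣ m := fun h => hnd2 (h.trans hmva)
    set K := max a b with hKdef
    have h2a : 2^a ≤ v := Nat.le_of_dvd hvpos ⟨5^b*m, by rw [hvm]; ring⟩
    have h5b : 5^b ≤ v := Nat.le_of_dvd hvpos ⟨2^a*m, by rw [hvm]; ring⟩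
    have ha2 : a < 2^a := Nat.lt_two_pow_self
    have hb5 : b < 5^b := Nat.lt_pow_self (by norm_num)
    -- rewrite B side bookkeeping
    have hBv : d / gcdLoop r0 d = v := by rw [gcdLoop_eq]
    rw [if_neg hz, hBv, hstrip2, hstrip5]
    by_cases hm1 : m = 1
    -- terminating decimal: both return ""
    · have hpreJ : ∀ t, t < K → rseq d r0 t ≠ 0 ∧ ∀ i, i < t → rseq d r0 i ≠ rseq d r0 t := by
        intro t ht
        refine ⟨?_, ?_⟩
        · intro h0
          obtain ⟨h1, h2, -⟩ := (rseq_eq_zero_iff t hgpos hrgu hdgv huv hvm hnd2m hnd5).mp h0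
          omega
        · intro i hi hcon
          obtain ⟨h1, h2, -⟩ := (rseq_eq_iff hi hgpos hrgu hdgv huv hvm hnd2m hnd5).mp hcon
          omega
      have hstopJ : rseq d r0 K = 0 ∨ ∃ i, i < K ∧ rseq d r0 i = rseq d r0 K :=
        Or.inl ((rseq_eq_zero_iff K hgpos hrgu hdgv huv hvm hnd2m hnd5).mpr
          ⟨le_max_left a b, le_max_right a b, hm1⟩)
      have hrun := loopA_run d r0 K hd hpreJ hstopJ K 0 (d+1) (by omega) (by omega)
      rw [hrs0, seenD_zero, digsL_zero] at hrun
      rw [hrun]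
      have hK0 : rseq d r0 K = 0 :=
        (rseq_eq_zero_iff K hgpos hrgu hdgv huv hvm hnd2m hnd5).mpr
          ⟨le_max_left a b, le_max_right a b, hm1⟩
      simp [hK0, hm1]
    -- repeating decimal
    · have hm2 : 2 ≤ m := by omega
      obtain ⟨e0, he0, he0le⟩ := exists_period hm2 hnd2m hnd5
      have hexL : ∃ e, 1 ≤ e ∧ m ∣ 10 ^ e - 1 := ⟨e0, he0⟩
      set L := Nat.find hexL with hLdef
      obtain ⟨hL1, hLdvd⟩ := Nat.find_spec hexL
      have hLmin : ∀ e, e < L → ¬ (1 ≤ e ∧ m ∣ 10 ^ e - 1) := fun e he => Nat.find_min hexL he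
      have hLle : L ≤ m := le_trans (Nat.find_min' hexL he0) he0le
      -- J = K + L fits in the fuel
      have hexp1 : (a+1) * m = a*m + m := by ring
      have hexp2 : (b+1) * m = b*m + m := by ring
      have ham : a ≤ a * m := Nat.le_mul_of_pos_right a hmpos
      have hbm : b ≤ b * m := Nat.le_mul_of_pos_right b hmpos
      have h2am : 2^a * m ≤ v := Nat.le_of_dvd hvpos ⟨5^b, by rw [hvm]; ring⟩
      have h5bm : 5^b * m ≤ v := Nat.le_of_dvd hvpos ⟨2^a, by rw [hvm]; ring⟩
      have hma : (a+1) * m ≤ 2^a * m := Nat.mul_le_mul_right m (by omega)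
      have hmb : (b+1) * m ≤ 5^b * m := Nat.mul_le_mul_right m (by omega)
      have haux1 : a + m ≤ v := by omega
      have haux2 : b + m ≤ v := by omega
      have hJd : K + L ≤ d := by omega
      -- the loop stops exactly at K + L, having seen rseq K at index K
      have hstopeq : rseq d r0 K = rseq d r0 (K + L) := by
        refine (rseq_eq_iff (show K < K + L by omega) hgpos hrgu hdgv huv hvm hnd2m hnd5).mpr ?_
        exact ⟨le_max_left a b, le_max_right a b, by simpa using hLdvd⟩
      have hpreJ : ∀ t, t < K + L → rseq d r0 t ≠ 0 ∧ ∀ i, i < t → rseq d r0 i ≠ rseq d r0 t := by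
        intro t ht
        refine ⟨?_, ?_⟩
        · intro h0
          obtain ⟨-, -, h1⟩ := (rseq_eq_zero_iff t hgpos hrgu hdgv huv hvm hnd2m hnd5).mp h0
          omega
        · intro i hi hcon
          obtain ⟨hai, hbi, hdvdi⟩ := (rseq_eq_iff hi hgpos hrgu hdgv huv hvm hnd2m hnd5).mp hcon
          have hKi : K ≤ i := by omega
          have hnot : ¬ (t - i < L) := fun hlt => hLmin _ hlt ⟨by omega, hdvdi⟩
          omega
      have hstopJ : rseq d r0 (K+L) = 0 ∨ ∃ i, i < K + L ∧ rseq d r0 i = rseq d r0 (K+L) :=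
        Or.inr ⟨K, by omega, hstopeq⟩
      have hrun := loopA_run d r0 (K+L) hd hpreJ hstopJ (K+L) 0 (d+1) (by omega) (by omega)
      rw [hrs0, seenD_zero, digsL_zero] at hrun
      rw [hrun]
      have hJne : rseq d r0 (K+L) ≠ 0 := by
        intro h0
        obtain ⟨-, -, h1⟩ := (rseq_eq_zero_iff (K+L) hgpos hrgu hdgv huv hvm hnd2m hnd5).mp h0
        omega
      have huniq : ∀ j, j < K + L → j ≠ K → rseq d r0 j ≠ rseq d r0 (K+L) := by
        intro j hj hjK hcon
        obtain ⟨haj, hbj, hdvdj⟩ :=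
          (rseq_eq_iff hj hgpos hrgu hdgv huv hvm hnd2m hnd5).mp hcon
        have hKj : K ≤ j := by omega
        exact hLmin (K + L - j) (by omega) ⟨by omega, hdvdj⟩
      have hget : (seenD d r0 (K+L)).get? (rseq d r0 (K+L)) = some K :=
        seen_get?_some d r0 (K+L) K _ (by omega) hstopeq huniq
      -- evaluate A's answer
      simp only [if_neg hJne, hget]
      -- evaluate B's answer
      rw [if_neg hm1]
      have hadv := advLoop_rseq d r0 K 0
      rw [hrs0, Nat.zero_add] at hadv
      rw [hadv]
      have hne : ∀ t, 0 < t → t < L → rseq d r0 (K + t) ≠ rseq d r0 K := by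
        intro t h0 hL hcon
        obtain ⟨-, -, hdvdt⟩ :=
          (rseq_eq_iff (show K < K + t by omega) hgpos hrgu hdgv huv hvm hnd2m hnd5).mp hcon.symm
        exact hLmin t hL ⟨h0, by simpa using hdvdt⟩
      have hemit := emit_spec d r0 K L hstopeq.symm hne (L-1) 0 [] (d+1) (by omega) (by omega)
      rw [show L - 1 + 1 = L by omega] at hemit
      simp only [Nat.add_zero] at hemit
      rw [hemit]
      -- the two digit lists coincide
      congr 1
      rw [PySem.List.slice_from_natCast]
      rw [digsL, List.range_add, List.map_append, List.map_map]
      rw [List.drop_left' (by simp)]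
      simp only [List.nil_append]
      apply List.map_congr_left
      intro i _
      rfl

-- ===== VERDICT (by name: the statement is the Claim_ definition above) =====
theorem recurring_sequence_spec : Claim_equal_recurring_sequence := by
  intro numerator denominator _ hpre
  have hd : 0 < denominator.natAbs := Int.natAbs_pos.mpr hpre
  exact main_eq denominator.natAbs (numerator.natAbs % denominator.natAbs) hd
    (Nat.mod_lt _ hd)
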